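-- pv_equiv track=rewrite | github.com/dhruvi0308/Python | hw7pr1.py | count_family
-- ===== SOURCE A (Python) =====
-- def count_family(names):
--     """ Returns a dictionary with keys being the unique last names and
--     values being the number of times each last name appears in the list. """
--     family_count = {}
--
--     for full_name in names:
--         last_name = full_name.split()[-1]
--         if last_name in family_count:
--             family_count[last_name] += 1
--         else:
--             family_count[last_name] = 1
--
--     return family_count
-- ===== SOURCE B (Python) =====
-- def count_family(names):
--     lasts = [full_name.split()[-1] for full_name in names]
--     # run-length count over the sorted last names
--     cnt = {}
--     prev = None
--     run = 0
--     for ln in sorted(lasts):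
--         if ln == prev:
--             run += 1
--         else:
--             if prev is not None:
--                 cnt[prev] = run
--             prev = ln
--             run = 1
--     if prev is not None:
--         cnt[prev] = run
--     # emit in first-appearance order
--     return {ln: cnt[ln] for ln in dict.fromkeys(lasts)}
-- ===== Notes on version B (the rewrite author's own statement) =====
-- stated objective: alternative
-- what changed: Replaces the single-pass membership-test-and-increment dictionary loop with a sort-then-group strategy: extract all last names, sort them, compute each multiplicity by a run-length pass over the sorted list, and emit the counts in first-appearance order.
import Mathlib
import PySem

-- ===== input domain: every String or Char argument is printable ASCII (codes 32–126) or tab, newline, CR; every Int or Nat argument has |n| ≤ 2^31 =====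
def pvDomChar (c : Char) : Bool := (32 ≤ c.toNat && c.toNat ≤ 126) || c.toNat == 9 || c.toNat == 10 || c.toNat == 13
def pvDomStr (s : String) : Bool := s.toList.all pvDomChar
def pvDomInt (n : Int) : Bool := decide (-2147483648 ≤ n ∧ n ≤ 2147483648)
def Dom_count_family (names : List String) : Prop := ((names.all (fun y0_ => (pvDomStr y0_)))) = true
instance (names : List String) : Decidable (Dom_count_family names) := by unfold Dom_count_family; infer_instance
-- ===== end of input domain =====

-- B counts last names by sort + run-length grouping (then emits in first-appearance order)
-- instead of A's single-pass membership-test-and-increment dictionary loop.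


-- ===== PORT A =====
def count_family (names : List String) : List (String × Int) :=
  (names.foldl (fun family_count full_name =>
      -- full_name.split()[-1]; Python raises IndexError when split() is empty (excluded by
      -- Pre_count_family), so the .getD "" default is never reached on admitted inputs
      let last_name := ((PySem.List.pyGet? (PySem.Str.split₀ full_name) (-1))).getD ""
      if family_count.contains last_name then
        family_count.modify last_name 0 (· + 1)
      else
        family_count.insert last_name 1) PySem.Dict.empty).items

-- ===== PORT B =====
-- the body of Source B's 'for ln in sorted(lasts)' loop; state = (cnt, prev, run)
def pvRunStep (st : PySem.Dict String Int × Option String × Int) (ln : String) :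
    PySem.Dict String Int × Option String × Int :=
  match st with
  | (cnt, prev, run) =>
    if some ln == prev then        -- 'ln == prev' (False when prev is None)
      (cnt, prev, run + 1)
    else
      match prev with              -- 'if prev is not None: cnt[prev] = run'
      | none   => (cnt, some ln, 1)
      | some p => (cnt.insert p run, some ln, 1)

def count_family_alt (names : List String) : List (String × Int) :=
  let lasts := names.map (fun full_name =>
      -- same split()[-1] expression as in Source B; raises (none) exactly where A does
      ((PySem.List.pyGet? (PySem.Str.split₀ full_name) (-1))).getD "")
  let st := (PySem.List.sorted lasts (fun x => x) false).foldl pvRunStep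
              (PySem.Dict.empty, none, 0)
  let cnt := match st.2.1 with     -- trailing 'if prev is not None: cnt[prev] = run'
             | none => st.1
             | some p => st.1.insert p st.2.2
  -- 'cnt[ln]' in Source B: ln ∈ lasts so the key is present and the .getD 0 default is unreachable
  (PySem.List.dedup lasts).map (fun ln => (ln, (cnt.get? ln).getD 0))

-- ===== PRECONDITION & SPEC =====
-- Excludes exactly the inputs where Python A raises IndexError: a name whose split() is empty
-- (an empty or whitespace-only string).
def Pre_count_family (names : List String) : Prop :=
  ∀ s ∈ names, PySem.Str.split₀ s ≠ []
instance (names : List String) : Decidable (Pre_count_family names) := by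
  unfold Pre_count_family; infer_instance
def pvWitness_count_family : List String := ["John Smith", "Ann Smith", "Bo Lee"]

def Spec_count_family (names : List String) (out : List (String × Int)) : Prop := out = count_family_alt names
instance (names : List String) (out : List (String × Int)) : Decidable (Spec_count_family names out) := by unfold Spec_count_family; infer_instance

-- ===== CLAIM (what is proved, stated in full; the proofs are below) =====
def Claim_equal_count_family : Prop := ∀ (names : List String), Dom_count_family names → Pre_count_family names → Spec_count_family names (count_family names)

-- ===== LEMMAS AND PROOFS =====

-- A's branch (test membership, then increment or insert 1) is exactly Counter's modify step.
theorem pv_step_eq {κ : Type} [BEq κ] [LawfulBEq κ] (d : PySem.Dict κ Int) (x : κ) :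
    (if d.contains x then d.modify x 0 (· + 1) else d.insert x 1) = d.modify x 0 (· + 1) := by
  by_cases h : d.contains x = true
  · simp [h]
  · have hc : d.contains x = false := by simpa using h
    simp [h, PySem.Dict.modify]
    rw [PySem.Dict.getD_of_not_contains d 0 hc]
    norm_num

-- the finishing flush of Source B applied to a fold state
def pvRunFinish (st : PySem.Dict String Int × Option String × Int) : PySem.Dict String Int :=
  match st.2.1 with
  | none => st.1
  | some p => st.1.insert p st.2.2

-- invariant of the run-length loop on a ≤-sorted remainder xs, running key p with count r so far
theorem pv_run_aux (v : String) :
    ∀ (xs : List String) (cnt : PySem.Dict String Int) (p : String) (r : Int),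
    xs.Pairwise (· ≤ ·) → (∀ x ∈ xs, p ≤ x) →
    (pvRunFinish (xs.foldl pvRunStep (cnt, some p, r))).get? v =
      if v = p then some (r + xs.count p)
      else if v ∈ xs then some (xs.count v)
      else cnt.get? v := by
  intro xs
  induction xs with
  | nil =>
    intro cnt p r _ _
    simp [pvRunFinish, PySem.Dict.get?_insert]
  | cons x t ih =>
    intro cnt p r hpw hge
    have hxt : ∀ y ∈ t, x ≤ y := (List.pairwise_cons.mp hpw).1
    have htpw : t.Pairwise (· ≤ ·) := (List.pairwise_cons.mp hpw).2
    by_cases hpx : p = x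
    · subst hpx
      rw [List.foldl_cons, show pvRunStep (cnt, some p, r) p = (cnt, some p, r + 1) by
        simp [pvRunStep]]
      rw [ih cnt p (r + 1) htpw hxt]
      by_cases hvp : v = p
      · subst hvp; simp; ring
      · simp [hvp, Ne.symm hvp]
    · have hplt : ∀ y ∈ t, p < y := fun y hy =>
        lt_of_lt_of_le (lt_of_le_of_ne (hge x (by simp)) hpx) (hxt y hy)
      rw [List.foldl_cons, show pvRunStep (cnt, some p, r) x = (cnt.insert p r, some x, 1) by
        simp [pvRunStep]; exact fun h => absurd h.symm hpx]
      rw [ih (cnt.insert p r) x 1 htpw hxt]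
      by_cases hvp : v = p
      · subst hvp
        have hvt : v ∉ t := fun h => absurd (hplt v h) (lt_irrefl v)
        have hxv : x ≠ v := fun h => hpx h.symm
        simp [hpx, hvt, hxv, PySem.Dict.get?_insert_self, List.count_eq_zero_of_not_mem hvt]
      · by_cases hvx : v = x
        · subst hvx; simp [hvp, Int.add_comm]
        · simp [hvp, hvx, Ne.symm hvx, PySem.Dict.get?_insert]

-- the run-length pass over a sorted list computes every multiplicity
theorem pv_run_counts (xs : List String) (hpw : xs.Pairwise (· ≤ ·)) (v : String) :
    (pvRunFinish (xs.foldl pvRunStep (PySem.Dict.empty, none, 0))).get? v =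
      if v ∈ xs then some (xs.count v) else none := by
  cases xs with
  | nil => simp [pvRunFinish, PySem.Dict.get?_empty]
  | cons x t =>
    have hxt : ∀ y ∈ t, x ≤ y := (List.pairwise_cons.mp hpw).1
    have htpw : t.Pairwise (· ≤ ·) := (List.pairwise_cons.mp hpw).2
    rw [List.foldl_cons, show pvRunStep (PySem.Dict.empty, none, 0) x
        = (PySem.Dict.empty, some x, 1) by simp [pvRunStep]]
    rw [pv_run_aux v t PySem.Dict.empty x 1 htpw hxt]
    by_cases hvx : v = x
    · subst hvx; simp [Int.add_comm]
    · simp [hvx, Ne.symm hvx, PySem.Dict.get?_empty, List.mem_cons]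
      split <;> simp

-- ===== VERDICT (by name: the statement is the Claim_ definition above) =====
theorem count_family_spec : Claim_equal_count_family := by
  intro names _ _
  unfold Spec_count_family count_family count_family_alt
  have h1 : (names.foldl (fun family_count full_name =>
      let last_name := ((PySem.List.pyGet? (PySem.Str.split₀ full_name) (-1))).getD ""
      if family_count.contains last_name then family_count.modify last_name 0 (· + 1)
      else family_count.insert last_name 1) PySem.Dict.empty)
      = PySem.Dict.counter (names.map (fun full_name =>
          ((PySem.List.pyGet? (PySem.Str.split₀ full_name) (-1))).getD "")) := by
    rw [PySem.Dict.counter_eq_foldl, List.foldl_map]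
    exact List.foldl_ext _ _ _ (fun d n _ => pv_step_eq d _)
  rw [h1, PySem.Dict.items_counter]
  set lasts := names.map (fun full_name =>
      ((PySem.List.pyGet? (PySem.Str.split₀ full_name) (-1))).getD "") with hl
  have hperm : (PySem.List.sorted lasts (fun x => x) false).Perm lasts :=
    PySem.List.sorted_perm lasts (fun x => x) false
  have hpw : (PySem.List.sorted lasts (fun x => x) false).Pairwise (· ≤ ·) :=
    PySem.List.sorted_pairwise lasts (fun x => x)
  rw [← PySem.List.dedup_eq_ofList]
  apply List.map_congr_left
  intro ln hln
  have hmem : ln ∈ lasts := by simpa using hln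
  have hmem' : ln ∈ PySem.List.sorted lasts (fun x => x) false := by
    simpa [PySem.List.mem_sorted] using hmem
  rw [show (match ((PySem.List.sorted lasts (fun x => x) false).foldl pvRunStep
        (PySem.Dict.empty, none, 0)).2.1 with
      | none => ((PySem.List.sorted lasts (fun x => x) false).foldl pvRunStep
          (PySem.Dict.empty, none, 0)).1
      | some p => (((PySem.List.sorted lasts (fun x => x) false).foldl pvRunStep
          (PySem.Dict.empty, none, 0)).1).insert p
          ((PySem.List.sorted lasts (fun x => x) false).foldl pvRunStep
          (PySem.Dict.empty, none, 0)).2.2)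
      = pvRunFinish ((PySem.List.sorted lasts (fun x => x) false).foldl pvRunStep
          (PySem.Dict.empty, none, 0)) from rfl]
  rw [pv_run_counts _ hpw ln]
  simp [hmem', hperm.count_eq]
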